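-- pv_equiv track=rewrite | github.com/mari-B144/LFA | tema1_c3.py | lambda_inchidere_cu_drum
-- ===== SOURCE A (Python) =====
-- def lambda_inchidere_cu_drum(stari, tranz):
--     rezultat = []
--     for (stare, drum) in stari:
--         rezultat.append((stare, drum))
--
--     schimbat = True
--     while schimbat:
--         schimbat = False
--         noi = []
--
--         for (stare, drum) in rezultat:
--             if (stare, "lambda") in tranz:
--                 for nxt in tranz[(stare, "lambda")]:
--                     drum_nou = drum + [(stare, "lambda", nxt)]
--                     pereche = (nxt, drum_nou)
--
--                     if pereche not in rezultat and pereche not in noi: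
--                         noi.append(pereche)
--                         schimbat = True
--
--         rezultat.extend(noi)
--
--     return rezultat
-- ===== SOURCE B (Python) =====
-- def lambda_inchidere_cu_drum(stari, tranz):
--     # frontier-only BFS by levels, with a set keyed on (state, tuple(path))
--     # for deduplication: a different traversal of the same closure
--     rezultat = list(stari)
--     seen = {(stare, tuple(drum)) for (stare, drum) in stari}
--     frontier = list(stari)
--     while frontier:
--         urmator = []
--         for (stare, drum) in frontier:
--             for nxt in tranz.get((stare, "lambda"), ()):
--                 drum_nou = drum + [(stare, "lambda", nxt)]
--                 cheie = (nxt, tuple(drum_nou))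
--                 if cheie not in seen:
--                     seen.add(cheie)
--                     urmator.append((nxt, drum_nou))
--         rezultat.extend(urmator)
--         frontier = urmator
--     return rezultat
-- ===== Notes on version B (the rewrite author's own statement) =====
-- stated objective: alternative
-- what changed: Replaced the repeat-until-stable full rescans of the whole result list (with list membership tests) by a frontier-only BFS over levels with a set for deduplication, so each (state, path) pair is expanded exactly once.
import Mathlib
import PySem

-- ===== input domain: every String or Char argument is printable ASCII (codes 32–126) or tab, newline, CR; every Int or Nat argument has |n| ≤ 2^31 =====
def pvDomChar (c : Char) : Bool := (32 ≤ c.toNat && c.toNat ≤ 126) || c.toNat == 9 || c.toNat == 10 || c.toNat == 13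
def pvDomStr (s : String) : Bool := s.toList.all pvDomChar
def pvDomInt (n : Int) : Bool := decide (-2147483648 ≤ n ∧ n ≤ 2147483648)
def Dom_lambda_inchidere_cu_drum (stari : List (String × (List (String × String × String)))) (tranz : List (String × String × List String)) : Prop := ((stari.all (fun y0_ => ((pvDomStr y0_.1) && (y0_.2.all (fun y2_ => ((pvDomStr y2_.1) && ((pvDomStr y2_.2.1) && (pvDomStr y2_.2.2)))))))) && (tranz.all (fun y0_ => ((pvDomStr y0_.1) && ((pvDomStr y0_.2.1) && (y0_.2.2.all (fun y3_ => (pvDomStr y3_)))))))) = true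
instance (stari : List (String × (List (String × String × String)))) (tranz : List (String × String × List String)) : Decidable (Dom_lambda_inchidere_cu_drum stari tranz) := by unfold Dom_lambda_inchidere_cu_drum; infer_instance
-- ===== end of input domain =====

-- ===== PORT A =====
-- B replaces A's repeat-until-stable full rescans (list membership tests against the whole
-- result) by a frontier-only level BFS with a set for dedup; same return value everywhere
-- (on a reachable lambda-cycle both Pythons loop forever; the fueled ports agree for every fuel).

-- dict lookup: Python '(stare, "lambda") in tranz' / 'tranz[(stare, "lambda")]' (first match)
def pvLookupLam (tranz : List (String × String × List String)) (s : String) : Option (List String) :=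
  match tranz with
  | [] => none
  | (a, b, v) :: rest => if a = s ∧ b = "lambda" then some v else pvLookupLam rest s

-- body of A's innermost loop 'for nxt in tranz[(stare, "lambda")]': state = (noi, schimbat);
-- 'pereche' = (nxt, drum + [(stare, "lambda", nxt)]) is written out at each occurrence
def addA (rezultat : List (String × List (String × String × String)))
    (p : String × List (String × String × String))
    (acc : List (String × List (String × String × String)) × Bool) (nxt : String) :
    List (String × List (String × String × String)) × Bool :=
  if (nxt, p.2 ++ [(p.1, "lambda", nxt)]) ∉ rezultat ∧ (nxt, p.2 ++ [(p.1, "lambda", nxt)]) ∉ acc.1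
  then (acc.1 ++ [(nxt, p.2 ++ [(p.1, "lambda", nxt)])], true) else acc

-- body of A's loop 'for (stare, drum) in rezultat' for one pair p
def stepA (tranz : List (String × String × List String))
    (rezultat : List (String × List (String × String × String)))
    (acc : List (String × List (String × String × String)) × Bool)
    (p : String × List (String × String × String)) :
    List (String × List (String × String × String)) × Bool :=
  match pvLookupLam tranz p.1 with
  | none => acc
  | some nxts => nxts.foldl (addA rezultat p) acc

-- one body of A's while loop, building (noi, schimbat)
def passA (tranz : List (String × String × List String))
    (rezultat : List (String × List (String × String × String))) :
    List (String × List (String × String × String)) × Bool :=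
  rezultat.foldl (stepA tranz rezultat) ([], false)

-- A's 'while schimbat:' loop; the fuel only makes the definition total: where Python A
-- terminates the passes have stabilized and extra fuel is never consumed
def loopA (tranz : List (String × String × List String)) :
    Nat → List (String × List (String × String × String)) → List (String × List (String × String × String))
  | 0, rezultat => rezultat
  | f + 1, rezultat =>
    let r := passA tranz rezultat
    if r.2 then loopA tranz f (rezultat ++ r.1) else rezultat ++ r.1

def lambda_inchidere_cu_drum (stari : List (String × (List (String × String × String)))) (tranz : List (String × String × List String)) : List (String × (List (String × String × String))) :=
  loopA tranz (tranz.length + 2) stari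

-- ===== PORT B =====
-- body of B's innermost loop: state = (urmator, seen);
-- 'cheie' = (nxt, drum + [(stare, "lambda", nxt)]) is written out at each occurrence
def addB (p : String × List (String × String × String))
    (acc : List (String × List (String × String × String)) × PySem.Set (String × List (String × String × String)))
    (nxt : String) :
    List (String × List (String × String × String)) × PySem.Set (String × List (String × String × String)) :=
  if PySem.Set.contains acc.2 (nxt, p.2 ++ [(p.1, "lambda", nxt)]) then acc
  else (acc.1 ++ [(nxt, p.2 ++ [(p.1, "lambda", nxt)])], PySem.Set.add acc.2 (nxt, p.2 ++ [(p.1, "lambda", nxt)]))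

-- body of B's loop 'for (stare, drum) in frontier' for one pair p
def stepB (tranz : List (String × String × List String))
    (acc : List (String × List (String × String × String)) × PySem.Set (String × List (String × String × String)))
    (p : String × List (String × String × String)) :
    List (String × List (String × String × String)) × PySem.Set (String × List (String × String × String)) :=
  match pvLookupLam tranz p.1 with
  | none => acc
  | some nxts => nxts.foldl (addB p) acc

-- B's 'while frontier:' loop; fuel for totality only, as in loopA
def loopB (tranz : List (String × String × List String)) :
    Nat → List (String × List (String × String × String)) →
    List (String × List (String × String × String)) →
    PySem.Set (String × List (String × String × String)) → List (String × List (String × String × String))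
  | 0, rezultat, _, _ => rezultat
  | f + 1, rezultat, frontier, seen =>
    if frontier.isEmpty then rezultat
    else
      let r := frontier.foldl (stepB tranz) ([], seen)
      loopB tranz f (rezultat ++ r.1) r.1 r.2

def lambda_inchidere_cu_drum_alt (stari : List (String × (List (String × String × String)))) (tranz : List (String × String × List String)) : List (String × (List (String × String × String))) :=
  loopB tranz (tranz.length + 2) stari stari (PySem.Set.ofList stari)

-- ===== PRECONDITION & SPEC =====
-- no Pre_: the two (fueled) ports agree on every input
def Spec_lambda_inchidere_cu_drum (stari : List (String × (List (String × String × String)))) (tranz : List (String × String × List String)) (out : List (String × (List (String × String × String)))) : Prop := out = lambda_inchidere_cu_drum_alt stari tranz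
instance (stari : List (String × (List (String × String × String)))) (tranz : List (String × String × List String)) (out : List (String × (List (String × String × String)))) : Decidable (Spec_lambda_inchidere_cu_drum stari tranz out) := by unfold Spec_lambda_inchidere_cu_drum; infer_instance

-- ===== CLAIM (what is proved, stated in full; the proofs are below) =====
def Claim_equal_lambda_inchidere_cu_drum : Prop := ∀ (stari : List (String × (List (String × String × String)))) (tranz : List (String × String × List String)), Dom_lambda_inchidere_cu_drum stari tranz → Spec_lambda_inchidere_cu_drum stari tranz (lambda_inchidere_cu_drum stari tranz)

-- ===== LEMMAS AND PROOFS =====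

abbrev PairT := String × List (String × String × String)
abbrev TzT := List (String × String × List String)

-- the pair generated from p by one lambda step to nxt (shared expression of addA/addB)
def mkP (p : PairT) (nxt : String) : PairT := (nxt, p.2 ++ [(p.1, "lambda", nxt)])

-- the lambda successors of a pair
def succsOf (tranz : TzT) (p : PairT) : List PairT :=
  match pvLookupLam tranz p.1 with
  | none => []
  | some nxts => nxts.map (mkP p)

-- the simulation relation between A's per-pass state and B's
def SimRel (rez : List PairT) (a : List PairT × Bool) (b : List PairT × PySem.Set PairT) : Prop :=
  a.1 = b.1 ∧ a.2 = !a.1.isEmpty ∧ (∀ q, q ∈ b.2 ↔ q ∈ rez ∨ q ∈ a.1)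

lemma addA_mono (rez : List PairT) (p : PairT) (acc : List PairT × Bool) (nxt : String)
    (q : PairT) (h : q ∈ acc.1) : q ∈ (addA rez p acc nxt).1 := by
  unfold addA
  split_ifs with h1
  · exact List.mem_append_left _ h
  · exact h

lemma innerA_mono (rez : List PairT) (p : PairT) (nxts : List String) (q : PairT) :
    ∀ acc : List PairT × Bool, q ∈ acc.1 → q ∈ (nxts.foldl (addA rez p) acc).1 := by
  induction nxts with
  | nil => intro acc h; exact h
  | cons nxt nxts ih => intro acc h; exact ih _ (addA_mono rez p acc nxt q h)

lemma stepA_mono (tranz : TzT) (rez : List PairT) (acc : List PairT × Bool) (p : PairT)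
    (q : PairT) (h : q ∈ acc.1) : q ∈ (stepA tranz rez acc p).1 := by
  unfold stepA
  cases pvLookupLam tranz p.1 with
  | none => exact h
  | some nxts => exact innerA_mono rez p nxts q _ h

lemma innerA_skip (rez : List PairT) (p : PairT) (nxts : List String)
    (h : ∀ nxt ∈ nxts, mkP p nxt ∈ rez) :
    ∀ acc : List PairT × Bool, nxts.foldl (addA rez p) acc = acc := by
  induction nxts with
  | nil => intro acc; rfl
  | cons nxt nxts ih =>
    intro acc
    have hstep : addA rez p acc nxt = acc := by
      have hmem := h nxt (List.mem_cons_self ..)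
      unfold addA
      rw [if_neg]
      intro hcon
      exact hcon.1 (by simpa [mkP] using hmem)
    simp only [List.foldl_cons, hstep]
    exact ih (fun nxt hn => h nxt (List.mem_cons_of_mem _ hn)) acc

lemma stepA_skip (tranz : TzT) (rez : List PairT) (acc : List PairT × Bool) (p : PairT)
    (h : ∀ q ∈ succsOf tranz p, q ∈ rez) : stepA tranz rez acc p = acc := by
  unfold stepA
  unfold succsOf at h
  cases hl : pvLookupLam tranz p.1 with
  | none => rfl
  | some nxts =>
    rw [hl] at h
    exact innerA_skip rez p nxts
      (fun nxt hn => h (mkP p nxt) (List.mem_map_of_mem hn)) acc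

lemma innerA_post (rez : List PairT) (p : PairT) (nxts : List String) (nxt : String)
    (hn : nxt ∈ nxts) :
    ∀ acc : List PairT × Bool, mkP p nxt ∈ rez ∨ mkP p nxt ∈ (nxts.foldl (addA rez p) acc).1 := by
  induction nxts with
  | nil => cases hn
  | cons nxt' nxts ih =>
    intro acc
    rcases List.mem_cons.mp hn with hh | hh
    · subst hh
      by_cases hin : mkP p nxt ∈ rez
      · exact Or.inl hin
      · refine Or.inr ?_
        simp only [List.foldl_cons]
        refine innerA_mono rez p nxts (mkP p nxt) _ ?_
        unfold addA
        split_ifs with h1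
        · exact List.mem_append_right _ (by simp [mkP])
        · rcases not_and_or.mp h1 with h2 | h2
          · exact absurd hin (by simpa [mkP] using h2)
          · simpa [mkP] using not_not.mp h2
    · simp only [List.foldl_cons]
      exact ih hh _

lemma stepA_post (tranz : TzT) (rez : List PairT) (acc : List PairT × Bool) (p : PairT)
    (q : PairT) (hq : q ∈ succsOf tranz p) : q ∈ rez ∨ q ∈ (stepA tranz rez acc p).1 := by
  unfold stepA
  unfold succsOf at hq
  cases hl : pvLookupLam tranz p.1 with
  | none => rw [hl] at hq; cases hq
  | some nxts =>
    rw [hl] at hq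
    rcases List.mem_map.mp hq with ⟨nxt, hn, he⟩
    rw [← he]
    exact innerA_post rez p nxts nxt hn acc

lemma add_sim (rez : List PairT) (a : List PairT × Bool) (b : List PairT × PySem.Set PairT)
    (p : PairT) (nxt : String) (h : SimRel rez a b) :
    SimRel rez (addA rez p a nxt) (addB p b nxt) := by
  obtain ⟨h1, h2, h3⟩ := h
  unfold addA addB
  by_cases hc : mkP p nxt ∈ rez ∨ mkP p nxt ∈ a.1
  · have hb : PySem.Set.contains b.2 (mkP p nxt) = true :=
      (PySem.Set.contains_iff _ _).mpr ((h3 _).mpr hc)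
    have ha : ¬ ((mkP p nxt) ∉ rez ∧ (mkP p nxt) ∉ a.1) := by
      rcases hc with hc | hc
      · exact fun hh => hh.1 hc
      · exact fun hh => hh.2 hc
    simp only [mkP] at hb ha
    rw [if_neg ha, if_pos hb]
    exact ⟨h1, h2, h3⟩
  · rw [not_or] at hc
    have hb : ¬ PySem.Set.contains b.2 (mkP p nxt) = true := by
      rw [PySem.Set.contains_iff, h3]
      exact fun hh => hh.elim hc.1 hc.2
    have ha : (mkP p nxt) ∉ rez ∧ (mkP p nxt) ∉ a.1 := hc
    simp only [mkP] at hb ha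
    rw [if_pos ha, if_neg hb]
    refine ⟨by rw [h1], by simp, fun q => ?_⟩
    rw [show ((nxt, p.2 ++ [(p.1, "lambda", nxt)]) : PairT) = mkP p nxt from rfl]
    rw [PySem.Set.mem_add, h3, List.mem_append, List.mem_singleton]
    tauto

lemma inner_sim (rez : List PairT) (p : PairT) (nxts : List String) :
    ∀ (a : List PairT × Bool) (b : List PairT × PySem.Set PairT), SimRel rez a b →
      SimRel rez (nxts.foldl (addA rez p) a) (nxts.foldl (addB p) b) := by
  induction nxts with
  | nil => intro a b h; exact h
  | cons nxt nxts ih => intro a b h; exact ih _ _ (add_sim rez a b p nxt h)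

lemma step_sim (tranz : TzT) (rez : List PairT) (a : List PairT × Bool)
    (b : List PairT × PySem.Set PairT) (p : PairT) (h : SimRel rez a b) :
    SimRel rez (stepA tranz rez a p) (stepB tranz b p) := by
  unfold stepA stepB
  cases pvLookupLam tranz p.1 with
  | none => exact h
  | some nxts => exact inner_sim rez p nxts a b h

lemma fold_sim (tranz : TzT) (rez : List PairT) (l : List PairT) (a : List PairT × Bool) (b : List PairT × PySem.Set PairT) (h : SimRel rez a b) :
    SimRel rez (l.foldl (stepA tranz rez) a) (l.foldl (stepB tranz) b) := by
  induction l generalizing a b with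
  | nil => exact h
  | cons p l ih => exact ih _ _ (step_sim tranz rez a b p h)

lemma fold_mono (tranz : TzT) (rez : List PairT) (l : List PairT) (acc : List PairT × Bool) (q : PairT) (h : q ∈ acc.1) :
    q ∈ (l.foldl (stepA tranz rez) acc).1 := by
  induction l generalizing acc with
  | nil => exact h
  | cons p l ih => exact ih _ (stepA_mono tranz rez acc p q h)

lemma fold_post (tranz : TzT) (rez : List PairT) (l : List PairT) (p : PairT) (q : PairT) :
    ∀ acc : List PairT × Bool, p ∈ l → q ∈ succsOf tranz p →
      q ∈ rez ∨ q ∈ (l.foldl (stepA tranz rez) acc).1 := by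
  induction l with
  | nil => intro acc hp _; cases hp
  | cons p' l ih =>
    intro acc hp hq
    rcases List.mem_cons.mp hp with hp | hp
    · subst hp
      rcases stepA_post tranz rez acc p q hq with h | h
      · exact Or.inl h
      · exact Or.inr (fold_mono tranz rez l _ q h)
    · exact ih _ hp hq

lemma fold_skip (tranz : TzT) (rez : List PairT) (l : List PairT)
    (h : ∀ p ∈ l, ∀ q ∈ succsOf tranz p, q ∈ rez) :
    ∀ acc : List PairT × Bool, l.foldl (stepA tranz rez) acc = acc := by
  induction l with
  | nil => intro acc; rfl
  | cons p l ih =>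
    intro acc
    simp only [List.foldl_cons, stepA_skip tranz rez acc p (h p (List.mem_cons_self ..))]
    exact ih (fun p hp => h p (List.mem_cons_of_mem _ hp)) _

lemma loopB_nil (tranz : TzT) (f : Nat) (rez : List PairT) (seen : PySem.Set PairT) : loopB tranz f rez [] seen = rez := by
  cases f <;> simp [loopB]

lemma loop_sim (tranz : TzT) (f : Nat) :
    ∀ (prev rez frontier : List PairT) (seen : PySem.Set PairT),
    rez = prev ++ frontier →
    (∀ p ∈ prev, ∀ q ∈ succsOf tranz p, q ∈ rez) →
    (∀ q, q ∈ seen ↔ q ∈ rez) →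
    loopA tranz f rez = loopB tranz f rez frontier seen := by
  induction f with
  | zero => intro prev rez frontier seen _ _ _; rfl
  | succ f ih =>
    intro prev rez frontier seen hsplit hsat hseen
    have hpass : passA tranz rez = frontier.foldl (stepA tranz rez) ([], false) := by
      unfold passA
      rw [hsplit] at hsat ⊢
      rw [List.foldl_append, fold_skip tranz (prev ++ frontier) prev
        (fun p hp => hsat p hp) ([], false)]
    have hrel : SimRel rez (frontier.foldl (stepA tranz rez) ([], false))
        (frontier.foldl (stepB tranz) ([], seen)) := by
      refine fold_sim tranz rez frontier ([], false) ([], seen) ⟨rfl, by simp, fun q => ?_⟩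
      simpa using hseen q
    obtain ⟨e1, e2, e3⟩ := hrel
    rcases hfront : frontier with _ | ⟨p0, rest⟩
    · -- empty frontier: the pass finds nothing, both sides return rez
      subst hfront
      simp only [List.foldl_nil] at hpass
      show (if (passA tranz rez).2 then loopA tranz f (rez ++ (passA tranz rez).1)
            else rez ++ (passA tranz rez).1) = loopB tranz (f + 1) rez [] seen
      rw [hpass]
      simp [loopB]
    · rw [← hfront]
      have hne : frontier.isEmpty = false := by rw [hfront]; rfl
      show (if (passA tranz rez).2 then loopA tranz f (rez ++ (passA tranz rez).1)
            else rez ++ (passA tranz rez).1) =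
           loopB tranz (f + 1) rez frontier seen
      have hB : loopB tranz (f + 1) rez frontier seen =
          loopB tranz f (rez ++ (frontier.foldl (stepB tranz) ([], seen)).1)
            (frontier.foldl (stepB tranz) ([], seen)).1
            (frontier.foldl (stepB tranz) ([], seen)).2 := by
        simp [loopB, hne]
      rw [hB, hpass]
      set aA := frontier.foldl (stepA tranz rez) ([], false) with hA
      set bB := frontier.foldl (stepB tranz) ([], seen) with hBdef
      by_cases hnoi : aA.1 = []
      · -- nothing new: A stops, B recurses once on an empty frontier
        have h2 : aA.2 = false := by rw [e2, hnoi]; rfl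
        rw [h2]
        simp only [if_neg Bool.false_ne_true]
        rw [← e1, hnoi, List.append_nil, loopB_nil]
      · -- something new: both recurse, with prev' = rez, frontier' = the new pairs
        have h2 : aA.2 = true := by rw [e2]; simp [hnoi]
        rw [h2, if_pos rfl, ← e1]
        refine ih rez (rez ++ aA.1) aA.1 bB.2 rfl ?_ ?_
        · intro p hp q hq
          rw [hsplit] at hp
          rcases List.mem_append.mp hp with hp | hp
          · exact List.mem_append_left _ (hsat p hp q hq)
          · rcases fold_post tranz rez frontier p q ([], false) hp hq with h | h
            · exact List.mem_append_left _ h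
            · exact List.mem_append_right _ (hA ▸ h)
        · intro q
          rw [e3 q, List.mem_append]

-- ===== VERDICT (by name: the statement is the Claim_ definition above) =====
theorem lambda_inchidere_cu_drum_spec : Claim_equal_lambda_inchidere_cu_drum := by
  intro stari tranz _
  unfold Spec_lambda_inchidere_cu_drum lambda_inchidere_cu_drum lambda_inchidere_cu_drum_alt
  exact loop_sim tranz (tranz.length + 2) [] stari stari (PySem.Set.ofList stari) rfl
    (by intro p hp; cases hp) (fun q => PySem.Set.mem_ofList stari q)
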